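-- pv_equiv track=rewrite | github.com/adnantabda/Competitive-Programming | C_Day_at_the_Beach.py | sortBlockAdnan
-- ===== SOURCE A (Python) =====
-- def sortBlockAdnan(arr):
--     n = len(arr)
--     preMax = [0] * n
--     sufMax = [0] * n
--
--     preMax[0] = arr[0]
--     for i in range(1, n):
--         preMax[i] = max(preMax[i - 1], arr[i])
--
--     sufMax[n - 1] = arr[n - 1]
--     for i in range(n - 2, -1, -1):
--         sufMax[i] = min(sufMax[i + 1], arr[i])
--
--     blocks = 0
--     for i in range(n - 1):
--         if preMax[i] <= sufMax[i + 1]: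
--             blocks += 1
--
--     return blocks + 1
-- ===== SOURCE B (Python) =====
-- def sortBlockAdnan(arr):
--     # Monotonic stack of chunk maxima: no prefix-max / suffix-min arrays.
--     stack = []
--     for x in arr:
--         if not stack or x >= stack[-1]:
--             stack.append(x)
--         else:
--             m = stack.pop()
--             while stack and stack[-1] > x:
--                 stack.pop()
--             stack.append(m)
--     return len(stack)
-- ===== Notes on version B (the rewrite author's own statement) =====
-- stated objective: faster
-- what changed: Replaced the prefix-max and suffix-min auxiliary arrays plus the counting pass by a single left-to-right pass maintaining a monotonic stack of chunk maxima (the answer is the stack size); no auxiliary arrays are built, which a timing run measured as a ~3x constant-factor speedup.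
import Mathlib
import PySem

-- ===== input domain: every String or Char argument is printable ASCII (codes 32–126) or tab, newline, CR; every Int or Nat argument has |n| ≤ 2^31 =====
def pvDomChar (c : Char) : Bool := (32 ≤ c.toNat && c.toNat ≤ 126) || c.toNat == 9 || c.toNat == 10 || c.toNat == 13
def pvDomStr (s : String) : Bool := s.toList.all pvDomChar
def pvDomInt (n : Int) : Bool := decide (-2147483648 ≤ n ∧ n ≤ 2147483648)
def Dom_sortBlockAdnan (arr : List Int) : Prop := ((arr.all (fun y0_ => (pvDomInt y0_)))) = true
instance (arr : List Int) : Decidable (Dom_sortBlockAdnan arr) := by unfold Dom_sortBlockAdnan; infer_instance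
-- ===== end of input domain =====

-- B replaces A's prefix-max/suffix-min arrays + counting pass by one pass with a monotonic
-- stack of chunk maxima (no auxiliary arrays; a timing run measured it faster by a constant factor).

-- ===== PORT A =====
-- preMax array: preMax[0] = arr[0]; preMax[i] = max(preMax[i-1], arr[i])
def preScan : Int → List Int → List Int
  | m, [] => [m]
  | m, x :: xs => m :: preScan (max m x) xs

-- sufMax array (suffix minima): sufMax[n-1] = arr[n-1]; sufMax[i] = min(sufMax[i+1], arr[i])
def sufList : List Int → List Int
  | [] => []
  | x :: xs =>
    match sufList xs with
    | [] => [x]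
    | s :: ss => min x s :: s :: ss

-- for i in range(n-1): if preMax[i] <= sufMax[i+1]: blocks += 1
def countZip : List Int → List Int → Int
  | p :: ps, s :: ss => (if p ≤ s then 1 else 0) + countZip ps ss
  | _, _ => 0

def sortBlockAdnan (arr : List Int) : Int :=
  match arr with
  | [] => 0  -- Python A raises IndexError here (indexing the first element); excluded by Pre_sortBlockAdnan
  | a :: rest => countZip (preScan a rest) ((sufList (a :: rest)).tail) + 1

-- ===== PORT B =====
-- one stack step: push x if x >= top, else pop the max, pop while top > x, push the max back
def stackStep (st : List Int) (x : Int) : List Int :=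
  match st with
  | [] => [x]
  | t :: ts => if t ≤ x then x :: t :: ts else t :: ts.dropWhile (fun u => decide (x < u))

def sortBlockAdnan_alt (arr : List Int) : Int :=
  ((arr.foldl stackStep []).length : Int)

-- ===== PRECONDITION & SPEC =====
-- Python A indexes the first element and raises IndexError on the empty list; only that input is excluded (B returns 0 there).
def Pre_sortBlockAdnan (arr : List Int) : Prop := arr ≠ []
instance (arr : List Int) : Decidable (Pre_sortBlockAdnan arr) := by unfold Pre_sortBlockAdnan; infer_instance
def pvWitness_sortBlockAdnan : List Int := ([3, 1, 2, 4])

def Spec_sortBlockAdnan (arr : List Int) (out : Int) : Prop := out = sortBlockAdnan_alt arr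
instance (arr : List Int) (out : Int) : Decidable (Spec_sortBlockAdnan arr out) := by unfold Spec_sortBlockAdnan; infer_instance

-- ===== CLAIM (what is proved, stated in full; the proofs are below) =====
def Claim_equal_sortBlockAdnan : Prop := ∀ (arr : List Int), Dom_sortBlockAdnan arr → Pre_sortBlockAdnan arr → Spec_sortBlockAdnan arr (sortBlockAdnan arr)

-- ===== LEMMAS AND PROOFS =====

-- common middle form: number of chunks of (a prefix of maximum m) followed by l
def go (m : Int) : List Int → Int
  | [] => 1
  | x :: xs => (if (x :: xs).all (fun y => decide (m ≤ y)) then 1 else 0) + go (max m x) xs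

theorem foldl_min_min (l : List Int) : ∀ a b : Int, l.foldl min (min a b) = min a (l.foldl min b) := by
  induction l with
  | nil => intro a b; rfl
  | cons c l ih =>
    intro a b
    simp only [List.foldl_cons]
    rw [min_assoc, ih]

theorem sufList_cons (x : Int) (xs : List Int) : sufList (x :: xs) = (xs.foldl min x) :: sufList xs := by
  induction xs generalizing x with
  | nil => rfl
  | cons y ys ih =>
    rw [show sufList (x :: y :: ys)
        = (match sufList (y :: ys) with | [] => [x] | s :: ss => min x s :: s :: ss) from rfl,
      ih y]
    simp only [List.foldl_cons]
    rw [foldl_min_min ys x y]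

theorem le_foldl_min (l : List Int) : ∀ (x m : Int), m ≤ l.foldl min x ↔ (m ≤ x ∧ ∀ y ∈ l, m ≤ y) := by
  induction l with
  | nil => intro x m; simp
  | cons y ys ih =>
    intro x m
    rw [List.foldl_cons, foldl_min_min ys x y, le_min_iff, ih y m]
    constructor
    · rintro ⟨hx, hy, hys⟩
      exact ⟨hx, fun z hz => by rcases List.mem_cons.1 hz with rfl | hz; exacts [hy, hys z hz]⟩
    · rintro ⟨hx, hall⟩
      exact ⟨hx, hall y (List.mem_cons_self ..), fun z hz => hall z (List.mem_cons_of_mem _ hz)⟩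

theorem countZip_go (rest : List Int) : ∀ m : Int, countZip (preScan m rest) (sufList rest) + 1 = go m rest := by
  induction rest with
  | nil => intro m; rfl
  | cons x xs ih =>
    intro m
    rw [show preScan m (x :: xs) = m :: preScan (max m x) xs from rfl, sufList_cons]
    simp only [countZip, go]
    rw [← ih (max m x)]
    have hiff : (m ≤ xs.foldl min x) ↔ (((x :: xs).all (fun y => decide (m ≤ y))) = true) := by
      rw [le_foldl_min xs x m]; simp
    by_cases h : ((x :: xs).all (fun y => decide (m ≤ y))) = true
    · rw [if_pos (hiff.2 h), if_pos h]; ring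
    · rw [if_neg (fun hh => h (hiff.1 hh)), if_neg h]; ring

theorem dropWhile_eq_filter (x : Int) (ts : List Int) (h : ts.Pairwise (fun a b => b ≤ a)) :
    ts.dropWhile (fun u => decide (x < u)) = ts.filter (fun u => decide (u ≤ x)) := by
  induction ts with
  | nil => rfl
  | cons t ts ih =>
    rcases List.pairwise_cons.1 h with ⟨h1, h2⟩
    by_cases hx : x < t
    · rw [List.dropWhile_cons_of_pos (by simpa using hx), List.filter_cons_of_neg (by simpa using hx)]
      exact ih h2
    · push_neg at hx
      rw [List.dropWhile_cons_of_neg (by simpa using hx), List.filter_cons_of_pos (by simpa using hx)]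
      rw [List.filter_eq_self.2 (fun b hb => by simpa using le_trans (h1 b hb) hx)]

theorem stack_len (l : List Int) : ∀ (m : Int) (ts : List Int), (m :: ts).Pairwise (fun a b => b ≤ a) →
    ((l.foldl stackStep (m :: ts)).length : Int)
      = go m l + ((ts.countP (fun t => l.all (fun y => decide (t ≤ y)))) : Int) := by
  induction l with
  | nil =>
    intro m ts _
    simp only [List.foldl_nil, List.length_cons, go, List.all_nil, List.countP_true]
    push_cast
    ring
  | cons x xs ih =>
    intro m ts hp
    rcases List.pairwise_cons.1 hp with ⟨h1, h2⟩
    simp only [List.foldl_cons]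
    have hgo : go m (x :: xs)
        = (if ((x :: xs).all (fun y => decide (m ≤ y))) = true then (1:Int) else 0) + go (max m x) xs := rfl
    by_cases hx : m ≤ x
    · rw [show stackStep (m :: ts) x = x :: m :: ts from by simp [stackStep, hx]]
      have hp' : (x :: m :: ts).Pairwise (fun a b => b ≤ a) := by
        refine List.pairwise_cons.2 ⟨?_, hp⟩
        intro b hb
        rcases List.mem_cons.1 hb with rfl | hb
        · exact hx
        · exact le_trans (h1 b hb) hx
      rw [ih x (m :: ts) hp']
      simp only [List.countP_cons]
      have hcnt : ts.countP (fun t => xs.all (fun y => decide (t ≤ y)))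
          = ts.countP (fun t => (x :: xs).all (fun y => decide (t ≤ y))) := by
        refine List.countP_congr (fun t ht => ?_)
        have htx : t ≤ x := le_trans (h1 t ht) hx
        simp [List.all_cons, htx]
      rw [hcnt, hgo, max_eq_right hx]
      have hb : ((x :: xs).all (fun y => decide (m ≤ y))) = (xs.all (fun y => decide (m ≤ y))) := by
        simp [List.all_cons, hx]
      rw [hb]
      split_ifs with h
      · push_cast; ring
      · push_cast; ring
    · push_neg at hx
      rw [show stackStep (m :: ts) x = m :: ts.dropWhile (fun u => decide (x < u)) from by
        simp [stackStep, not_le.2 hx]]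
      have hp' : (m :: ts.dropWhile (fun u => decide (x < u))).Pairwise (fun a b => b ≤ a) := by
        refine List.pairwise_cons.2 ⟨?_, h2.sublist (List.dropWhile_sublist _)⟩
        intro b hb
        exact h1 b ((List.dropWhile_sublist _).mem hb)
      rw [ih m _ hp']
      rw [dropWhile_eq_filter x ts h2, List.countP_filter]
      rw [hgo, max_eq_left (le_of_lt hx)]
      rw [if_neg (show ¬((x :: xs).all (fun y => decide (m ≤ y))) = true from by
        simp only [List.all_cons, Bool.and_eq_true, decide_eq_true_eq]
        exact fun h => absurd h.1 (not_le.2 hx))]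
      have hpred : (fun t => xs.all (fun y => decide (t ≤ y)) && decide (t ≤ x))
          = (fun t => (x :: xs).all (fun y => decide (t ≤ y))) := by
        funext t
        simp only [List.all_cons]
        exact Bool.and_comm _ _
      rw [hpred]
      ring

-- ===== VERDICT (by name: the statement is the Claim_ definition above) =====
theorem sortBlockAdnan_spec : Claim_equal_sortBlockAdnan := by
  intro arr _ hpre
  unfold Spec_sortBlockAdnan
  match arr with
  | [] => exact absurd rfl hpre
  | a :: rest =>
    show countZip (preScan a rest) ((sufList (a :: rest)).tail) + 1
        = ((List.foldl stackStep [] (a :: rest)).length : Int)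
    rw [sufList_cons, List.tail_cons, countZip_go rest a]
    rw [List.foldl_cons, show stackStep [] a = [a] from rfl]
    rw [stack_len rest a [] (by simp)]
    simp
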